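-- pv_equiv track=rewrite | github.com/Sundeepg98/colab-bridge | archive/unified-integration/platform/src/unified_optimizer.py | _extract_ai_additions
-- ===== SOURCE A (Python) =====
-- from typing import Dict, List, Tuple, Optional, Any
--
-- def _extract_ai_additions(original: str, ai_optimized: str) -> List[str]:
--     """Extract valuable additions from AI optimization"""
--     original_words = set(original.lower().split())
--     ai_words = set(ai_optimized.lower().split())
--
--     # Find new descriptive elements
--     additions = []
--     new_words = ai_words - original_words
--
--     # Categories of valuable additions
--     valuable_categories = {
--         "technical": ["4k", "8k", "composition", "lighting", "cinematic", "depth"],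
--         "atmospheric": ["atmosphere", "mood", "feeling", "ambiance"],
--         "stylistic": ["style", "aesthetic", "artistic", "visual"],
--         "temporal": ["moment", "time", "era", "period"]
--     }
--
--     for category, keywords in valuable_categories.items():
--         for keyword in keywords:
--             if keyword in new_words:
--                 # Find the phrase containing this keyword
--                 for i, word in enumerate(ai_optimized.split()):
--                     if keyword in word.lower():
--                         # Extract surrounding context
--                         start = max(0, i - 2)
--                         end = min(len(ai_optimized.split()), i + 3)
--                         phrase = " ".join(ai_optimized.split()[start:end])
--                         additions.append(phrase)
--                         break
--
--     return additions
-- ===== SOURCE B (Python) =====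
-- from typing import List
--
-- _KEYWORDS = ["4k", "8k", "composition", "lighting", "cinematic", "depth",
--              "atmosphere", "mood", "feeling", "ambiance",
--              "style", "aesthetic", "artistic", "visual",
--              "moment", "time", "era", "period"]
--
-- def _extract_ai_additions(original: str, ai_optimized: str) -> List[str]:
--     """Extract valuable additions from AI optimization"""
--     words = ai_optimized.split()
--     new_words = set(ai_optimized.lower().split()) - set(original.lower().split())
--
--     # one pass over the words: first index whose lowercase form contains each keyword
--     first_occ = {}
--     for i, word in enumerate(words):
--         lw = word.lower()
--         for kw in _KEYWORDS:
--             if kw not in first_occ and kw in lw: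
--                 first_occ[kw] = i
--
--     additions = []
--     for kw in _KEYWORDS:
--         if kw in new_words and kw in first_occ:
--             i = first_occ[kw]
--             additions.append(" ".join(words[max(0, i - 2):min(len(words), i + 3)]))
--     return additions
-- ===== Notes on version B (the rewrite author's own statement) =====
-- stated objective: alternative
-- what changed: B splits ai_optimized once and builds a first-occurrence index (keyword -> first word index whose lowercase form contains it) in a single pass over the words, then emits phrases by dictionary lookup in keyword order, instead of A's per-keyword rescan of ai_optimized.split() (which A also recomputes inside each scan); it trades A's gate-then-scan repetition for an unconditional index build.
import Mathlib
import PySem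

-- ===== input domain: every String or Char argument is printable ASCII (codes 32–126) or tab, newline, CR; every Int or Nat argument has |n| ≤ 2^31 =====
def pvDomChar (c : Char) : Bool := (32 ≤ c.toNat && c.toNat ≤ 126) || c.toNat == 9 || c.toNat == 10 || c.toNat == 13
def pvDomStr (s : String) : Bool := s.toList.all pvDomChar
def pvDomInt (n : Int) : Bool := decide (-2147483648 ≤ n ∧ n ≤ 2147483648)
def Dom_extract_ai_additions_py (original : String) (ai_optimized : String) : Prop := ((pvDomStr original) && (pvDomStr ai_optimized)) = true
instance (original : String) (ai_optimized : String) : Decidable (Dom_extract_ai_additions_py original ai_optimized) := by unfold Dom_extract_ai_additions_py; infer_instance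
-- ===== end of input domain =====

-- B replaces A's per-keyword rescans of ai_optimized.split() by one split + one pass building a
-- first-occurrence index per keyword, then a lookup-driven emission pass (objective: alternative decomposition).

-- ===== PORT A =====
def pvCategoriesA : List (String × List String) :=
  [("technical", ["4k", "8k", "composition", "lighting", "cinematic", "depth"]),
   ("atmospheric", ["atmosphere", "mood", "feeling", "ambiance"]),
   ("stylistic", ["style", "aesthetic", "artistic", "visual"]),
   ("temporal", ["moment", "time", "era", "period"])]

-- 'for i, word in enumerate(ai_optimized.split()): if keyword in word.lower(): …; break'
def pvScanA (keyword : String) (full : List String) : List (Int × String) → Option String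
  | [] => none
  | (i, w) :: rest =>
    if PySem.Str.isIn keyword (PySem.Str.lower w) then
      some (PySem.Str.join " " (PySem.List.slice full (some (max 0 (i - 2)))
              (some (min (full.length : Int) (i + 3)))))
    else pvScanA keyword full rest

def extract_ai_additions_py (original : String) (ai_optimized : String) : List String :=
  let original_words := PySem.Set.ofList (PySem.Str.split₀ (PySem.Str.lower original))
  let ai_words := PySem.Set.ofList (PySem.Str.split₀ (PySem.Str.lower ai_optimized))
  let new_words := PySem.Set.diff ai_words original_words
  pvCategoriesA.foldl (fun additions ck =>
    ck.2.foldl (fun additions keyword =>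
      if PySem.Set.contains new_words keyword then
        match pvScanA keyword (PySem.Str.split₀ ai_optimized)
                (PySem.List.enumerate (PySem.Str.split₀ ai_optimized) 0) with
        | some phrase => additions ++ [phrase]
        | none => additions
      else additions) additions) []

-- ===== PORT B =====
def pvKeywordsB : List String :=
  ["4k", "8k", "composition", "lighting", "cinematic", "depth",
   "atmosphere", "mood", "feeling", "ambiance",
   "style", "aesthetic", "artistic", "visual",
   "moment", "time", "era", "period"]

-- inner loop of the index build: 'for kw in _KEYWORDS: if kw not in first_occ and kw in lw: first_occ[kw] = i'
def pvStepB (i : Int) (lw : String) (d : PySem.Dict String Int) : PySem.Dict String Int :=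
  pvKeywordsB.foldl (fun d kw =>
    if !(PySem.Dict.contains d kw) && PySem.Str.isIn kw lw then PySem.Dict.insert d kw i else d) d

-- 'for i, word in enumerate(words): …'
def pvFirstOcc (ps : List (Int × String)) (d : PySem.Dict String Int) : PySem.Dict String Int :=
  ps.foldl (fun d p => pvStepB p.1 (PySem.Str.lower p.2) d) d

def extract_ai_additions_py_alt (original : String) (ai_optimized : String) : List String :=
  let words := PySem.Str.split₀ ai_optimized
  let new_words := PySem.Set.diff (PySem.Set.ofList (PySem.Str.split₀ (PySem.Str.lower ai_optimized)))
                                  (PySem.Set.ofList (PySem.Str.split₀ (PySem.Str.lower original)))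
  let first_occ := pvFirstOcc (PySem.List.enumerate words 0) PySem.Dict.empty
  pvKeywordsB.foldl (fun additions kw =>
    if PySem.Set.contains new_words kw then
      match PySem.Dict.get? first_occ kw with
      | some i => additions ++ [PySem.Str.join " " (PySem.List.slice words (some (max 0 (i - 2)))
                    (some (min (words.length : Int) (i + 3))))]
      | none => additions
    else additions) []

-- ===== PRECONDITION & SPEC =====
def Spec_extract_ai_additions_py (original : String) (ai_optimized : String) (out : List String) : Prop := out = extract_ai_additions_py_alt original ai_optimized
instance (original : String) (ai_optimized : String) (out : List String) : Decidable (Spec_extract_ai_additions_py original ai_optimized out) := by unfold Spec_extract_ai_additions_py; infer_instance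

-- ===== CLAIM (what is proved, stated in full; the proofs are below) =====
def Claim_equal_extract_ai_additions_py : Prop := ∀ (original : String) (ai_optimized : String), Dom_extract_ai_additions_py original ai_optimized → Spec_extract_ai_additions_py original ai_optimized (extract_ai_additions_py original ai_optimized)

-- ===== LEMMAS AND PROOFS =====

-- first index ≥ s of a word whose lowercase form contains kw
def pvIdx (kw : String) : List String → Int → Option Int
  | [], _ => none
  | w :: t, s => if PySem.Str.isIn kw (PySem.Str.lower w) then some s else pvIdx kw t (s + 1)

lemma pvScanA_eq_pvIdx (kw : String) (full ws : List String) (s : Int) :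
    pvScanA kw full (PySem.List.enumerate ws s)
      = (pvIdx kw ws s).map (fun i => PySem.Str.join " " (PySem.List.slice full (some (max 0 (i - 2)))
          (some (min (full.length : Int) (i + 3))))) := by
  induction ws generalizing s with
  | nil => simp [PySem.List.enumerate_nil, pvScanA, pvIdx]
  | cons w t ih =>
    rw [PySem.List.enumerate_cons]
    simp only [pvScanA, pvIdx]
    split_ifs with h
    · rfl
    · exact ih (s + 1)

lemma pvStepB_get?_frame (ks : List String) (kw : String) (i : Int) (lw : String) :
    ∀ (d : PySem.Dict String Int), kw ∉ ks →
    PySem.Dict.get? (ks.foldl (fun d k =>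
      if !(PySem.Dict.contains d k) && PySem.Str.isIn k lw then PySem.Dict.insert d k i else d) d) kw
      = PySem.Dict.get? d kw := by
  induction ks with
  | nil => intro d _; rfl
  | cons k t ih =>
    intro d hk
    simp only [List.foldl_cons]
    have hne : kw ≠ k := fun h => hk (h ▸ List.mem_cons_self)
    rw [ih _ (fun h => hk (List.mem_cons_of_mem _ h))]
    split_ifs with h
    · exact PySem.Dict.get?_insert_of_ne _ _ hne
    · rfl

lemma pvStepB_get?_gen (ks : List String) (kw : String) (i : Int) (lw : String) :
    ∀ (d : PySem.Dict String Int), ks.Nodup → kw ∈ ks →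
    PySem.Dict.get? (ks.foldl (fun d k =>
      if !(PySem.Dict.contains d k) && PySem.Str.isIn k lw then PySem.Dict.insert d k i else d) d) kw
      = (if !(PySem.Dict.contains d kw) && PySem.Str.isIn kw lw then some i else PySem.Dict.get? d kw) := by
  induction ks with
  | nil => intro d _ hk; cases hk
  | cons k t ih =>
    intro d hnd hk
    simp only [List.foldl_cons]
    rcases List.mem_cons.mp hk with rfl | hmem
    · rw [pvStepB_get?_frame t kw i lw _ (List.nodup_cons.mp hnd).1]
      by_cases h : (!(PySem.Dict.contains d kw) && PySem.Str.isIn kw lw) = true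
      · simp only [h, if_true]; exact PySem.Dict.get?_insert_self _ _ _
      · rw [if_neg h, if_neg h]
    · have hne : kw ≠ k := fun h => (List.nodup_cons.mp hnd).1 (h ▸ hmem)
      by_cases h : (!(PySem.Dict.contains d k) && PySem.Str.isIn k lw) = true
      · rw [if_pos h, ih _ (List.nodup_cons.mp hnd).2 hmem]
        have hc : PySem.Dict.contains (PySem.Dict.insert d k i) kw = PySem.Dict.contains d kw := by
          rw [PySem.Dict.contains_insert]
          simp [(by simp [hne] : (kw == k) = false)]
        rw [hc, PySem.Dict.get?_insert_of_ne d i hne]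
      · rw [if_neg h, ih _ (List.nodup_cons.mp hnd).2 hmem]

lemma pvFirstOcc_get? (kw : String) (hk : kw ∈ pvKeywordsB) (ws : List String) :
    ∀ (s : Int) (d : PySem.Dict String Int),
    PySem.Dict.get? (pvFirstOcc (PySem.List.enumerate ws s) d) kw
      = (if PySem.Dict.contains d kw then PySem.Dict.get? d kw else pvIdx kw ws s) := by
  induction ws with
  | nil =>
    intro s d
    simp only [PySem.List.enumerate_nil, pvFirstOcc, List.foldl_nil, pvIdx]
    split_ifs with h
    · rfl
    · exact (PySem.Dict.get?_eq_none_iff_contains d kw).mpr (by simpa using h)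
  | cons w t ih =>
    intro s d
    rw [PySem.List.enumerate_cons]
    simp only [pvFirstOcc, List.foldl_cons] at *
    rw [ih]
    have hnd : pvKeywordsB.Nodup := by decide
    have hget : PySem.Dict.get? (pvStepB s (PySem.Str.lower w) d) kw
        = (if !(PySem.Dict.contains d kw) && PySem.Str.isIn kw (PySem.Str.lower w)
           then some s else PySem.Dict.get? d kw) :=
      pvStepB_get?_gen pvKeywordsB kw s (PySem.Str.lower w) d hnd hk
    have hcont : PySem.Dict.contains (pvStepB s (PySem.Str.lower w) d) kw
        = ((if !(PySem.Dict.contains d kw) && PySem.Str.isIn kw (PySem.Str.lower w)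
            then some s else PySem.Dict.get? d kw)).isSome := by
      rw [PySem.Dict.contains_eq_isSome_get?, hget]
    show (if PySem.Dict.contains (pvStepB s (PySem.Str.lower w) d) kw = true
          then PySem.Dict.get? (pvStepB s (PySem.Str.lower w) d) kw
          else pvIdx kw t (s + 1))
        = if PySem.Dict.contains d kw = true then PySem.Dict.get? d kw else pvIdx kw (w :: t) s
    rw [hcont, hget, pvIdx]
    by_cases h1 : PySem.Dict.contains d kw = true
    · have h2 : (PySem.Dict.get? d kw).isSome := by
        rw [← PySem.Dict.contains_eq_isSome_get?]; exact h1
      simp [h1, h2]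
    · have h2 : (PySem.Dict.get? d kw) = none :=
        (PySem.Dict.get?_eq_none_iff_contains d kw).mpr (by simpa using h1)
      by_cases h3 : PySem.Chars.isIn kw.toList (PySem.Chars.lower w.toList) = true
      · simp [PySem.Str.isIn, h1, h3]
      · simp [PySem.Str.isIn, h1, h2, h3]

lemma pv_foldl_foldl (l : List (String × List String)) (f : List String → String → List String)
    (init : List String) :
    l.foldl (fun acc ck => ck.2.foldl f acc) init = (l.flatMap (·.2)).foldl f init := by
  induction l generalizing init with
  | nil => rfl
  | cons c t ih => simp [List.flatMap_cons, List.foldl_append, ih]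

-- ===== VERDICT (by name: the statement is the Claim_ definition above) =====
theorem extract_ai_additions_py_spec : Claim_equal_extract_ai_additions_py := by
  intro original ai_optimized _
  show extract_ai_additions_py original ai_optimized = extract_ai_additions_py_alt original ai_optimized
  simp only [extract_ai_additions_py, extract_ai_additions_py_alt]
  rw [pv_foldl_foldl]
  have hflat : pvCategoriesA.flatMap (·.2) = pvKeywordsB := by decide
  rw [hflat]
  apply PySem.List.foldl_congr_mem'
  intro kw hkw acc
  by_cases hnw : PySem.Set.contains
      (PySem.Set.diff (PySem.Set.ofList (PySem.Str.split₀ (PySem.Str.lower ai_optimized)))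
        (PySem.Set.ofList (PySem.Str.split₀ (PySem.Str.lower original)))) kw
  · simp only [hnw, if_true]
    rw [pvScanA_eq_pvIdx, pvFirstOcc_get? kw hkw]
    simp only [PySem.Dict.contains_empty, if_false, Bool.false_eq_true]
    cases pvIdx kw (PySem.Str.split₀ ai_optimized) 0 <;> rfl
  · simp only [hnw, if_false, Bool.false_eq_true]
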